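-- pv_equiv track=rewrite | github.com/borisovdenis-kb/annihilator-diplom | src/utility/math/math_utils.py | build_zhegalkin_polynomial
-- ===== SOURCE A (Python) =====
-- def build_zhegalkin_polynomial(vector, VARS, var_values):
--     res = []
--     coef = find_zhegalkin_polynomial_coefficients(vector)
--     if coef[0] == 1:
--         res = [str(coef[0])]
--     for i, values in enumerate(var_values):
--         s = []
--         if coef[i] != 0:
--             for j in range(len(values)):
--                 if values[j] == 1:
--                     s.append(VARS[j])
--             res.append('*'.join(s))
--
--     return '+'.join([s for s in res if s])
--
-- def find_zhegalkin_polynomial_coefficients(f):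
--     # нахождения коэффициентов многочлена Жег.
--     # методом Паскаля
--     # на вход принимает вектор значений булевой функции f
--     # ны выходе вектор коэффициентов многочлена Жег.
--     n = len(f)
--     coef = [[f[i]] for i in range(n)]
--
--     while n >= 1:
--         temp = [[] for i in range(n // 2)]
--
--         if len(coef) == 1:
--             return sum(coef, [])
--
--         for i in range(len(coef)):
--             if i % 2 == 0:
--                 for j in range(len(coef[i])):
--                     temp[int(i / 2)].append(coef[i][j])
--             else:
--                 for j in range(len(coef[i])):
--                     temp[int(i / 2)].append(coef[i - 1][j] ^ coef[i][j])
--         n //= 2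
--         coef = temp
-- ===== SOURCE B (Python) =====
-- def build_zhegalkin_polynomial(vector, VARS, var_values):
--     coef = _zhegalkin_coeffs(vector)
--     terms = ["1"] if coef and coef[0] == 1 else []
--     for i, values in enumerate(var_values):
--         if coef[i] != 0:
--             term = '*'.join(VARS[j] for j, v in enumerate(values) if v == 1)
--             if term:
--                 terms.append(term)
--     return '+'.join(terms)
--
--
-- def _zhegalkin_coeffs(f):
--     # top-down divide and conquer Mobius transform
--     if len(f) <= 1:
--         return list(f)
--     m = len(f) // 2
--     left = _zhegalkin_coeffs(f[:m])
--     right = _zhegalkin_coeffs(f[m:])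
--     return left + [x ^ y for x, y in zip(left, right)]
-- ===== Notes on version B (the rewrite author's own statement) =====
-- stated objective: simpler
-- what changed: Replaces A's bottom-up Pascal-triangle pass that repeatedly pairs nested lists of lists inside a while loop by a short top-down divide-and-conquer Moebius transform on flat lists (recurse on the two halves, then XOR the left result into the right), and filters empty terms as they are produced instead of collecting them and filtering in a final pass.
-- outside the precondition, e.g. on build_zhegalkin_polynomial([0, 0], [], [[1]]): A returns '', B returns ''
import Mathlib
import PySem

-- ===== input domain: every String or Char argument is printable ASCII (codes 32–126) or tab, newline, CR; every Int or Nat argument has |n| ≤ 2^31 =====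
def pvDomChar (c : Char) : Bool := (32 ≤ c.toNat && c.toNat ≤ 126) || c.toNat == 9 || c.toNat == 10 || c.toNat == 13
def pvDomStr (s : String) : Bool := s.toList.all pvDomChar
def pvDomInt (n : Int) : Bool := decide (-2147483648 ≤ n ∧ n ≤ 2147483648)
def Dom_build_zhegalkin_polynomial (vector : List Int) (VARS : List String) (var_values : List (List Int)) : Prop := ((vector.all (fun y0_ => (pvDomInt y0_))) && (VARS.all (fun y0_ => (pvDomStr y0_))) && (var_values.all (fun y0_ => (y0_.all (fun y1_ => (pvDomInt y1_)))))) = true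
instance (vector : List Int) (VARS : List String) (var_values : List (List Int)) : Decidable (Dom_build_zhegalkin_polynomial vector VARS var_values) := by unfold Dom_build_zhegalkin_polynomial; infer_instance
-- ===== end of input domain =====

-- B replaces A's bottom-up Pascal triangle of nested lists by a top-down divide-and-conquer
-- Möbius transform and filters empty terms as they are produced (objective: simpler).

-- ===== PORT A =====
-- one step of the inner 'for i in range(len(coef))' loop of find_zhegalkin_polynomial_coefficients
def pvRoundStep (coef : List (List Int)) (temp : List (List Int)) (i : Nat) : List (List Int) :=
  if i % 2 == 0 then
    temp.modify (i / 2) (fun t =>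
      (List.range (coef.getD i []).length).foldl
        (fun t j => t ++ [(coef.getD i []).getD j 0]) t)
  else
    temp.modify (i / 2) (fun t =>
      (List.range (coef.getD i []).length).foldl
        (fun t j => t ++ [PySem.Int.bxor ((coef.getD (i-1) []).getD j 0) ((coef.getD i []).getD j 0)]) t)

-- the body of the while loop: temp = [[] for i in range(n // 2)] filled by the i-loop
def pvPascalRound (coef : List (List Int)) (n : Nat) : List (List Int) :=
  (List.range coef.length).foldl (pvRoundStep coef) (List.replicate (n / 2) ([] : List Int))

-- 'while n >= 1: …'; when the loop exits without returning, Python returns None and the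
-- caller's coef[0] raises (outside Pre_); the port returns [] there
def pvPascalLoop (n : Nat) (coef : List (List Int)) : List Int :=
  if n ≥ 1 then
    let temp := pvPascalRound coef n
    if coef.length == 1 then coef.flatten
    else pvPascalLoop (n / 2) temp
  else []
termination_by n
decreasing_by omega

def pvFindCoeffs (f : List Int) : List Int :=
  pvPascalLoop f.length (f.map (fun x => [x]))

def build_zhegalkin_polynomial (vector : List Int) (VARS : List String) (var_values : List (List Int)) : String :=
  let coef := pvFindCoeffs vector
  let res : List String :=
    if coef.getD 0 0 == 1 then [PySem.Int.toStr (coef.getD 0 0)] else []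
  let res := var_values.zipIdx.foldl (fun res p =>
      if coef.getD p.2 0 != 0 then
        let s := (List.range p.1.length).foldl
          (fun s j => if p.1.getD j 0 == 1 then s ++ [VARS.getD j ""] else s) ([] : List String)
        res ++ [PySem.Str.join "*" s]
      else res) res
  PySem.Str.join "+" (res.filter (fun s => s != ""))

-- ===== PORT B =====
def pvAltCoeffs (f : List Int) : List Int :=
  if f.length ≤ 1 then f
  else
    let m := f.length / 2
    let left := pvAltCoeffs (f.take m)
    let right := pvAltCoeffs (f.drop m)
    left ++ List.zipWith (fun x y => PySem.Int.bxor x y) left right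
termination_by f.length
decreasing_by all_goals simp; omega

def build_zhegalkin_polynomial_alt (vector : List Int) (VARS : List String) (var_values : List (List Int)) : String :=
  let coef := pvAltCoeffs vector
  let terms : List String := if !coef.isEmpty && coef.getD 0 0 == 1 then ["1"] else []
  let terms := var_values.zipIdx.foldl (fun terms p =>
      if coef.getD p.2 0 != 0 then
        let term := PySem.Str.join "*"
          (p.1.zipIdx.filterMap (fun jv => if jv.1 == 1 then some (VARS.getD jv.2 "") else none))
        if term != "" then terms ++ [term] else terms
      else terms) terms
  PySem.Str.join "+" terms

-- ===== PRECONDITION & SPEC =====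
-- Pre_ excludes exactly the raising inputs: vector whose length is not a power of two
-- (Pascal's halving then raises IndexError, or the loop falls through to None and coef[0]
-- raises TypeError), var_values longer than vector (coef[i] raises IndexError), and rows
-- carrying a 1 at a position outside VARS (VARS[j] raises IndexError); the last clause is
-- checked on every row, so it also excludes some rows whose coefficient is 0 and on which
-- A returns without touching VARS — on those excluded inputs A and B return the same value.
def Pre_build_zhegalkin_polynomial (vector : List Int) (VARS : List String) (var_values : List (List Int)) : Prop :=
  (∃ k ≤ vector.length, vector.length = 2 ^ k) ∧
  var_values.length ≤ vector.length ∧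
  ∀ values ∈ var_values, ∀ j < values.length, values.getD j 0 = 1 → j < VARS.length
instance (vector : List Int) (VARS : List String) (var_values : List (List Int)) : Decidable (Pre_build_zhegalkin_polynomial vector VARS var_values) := by unfold Pre_build_zhegalkin_polynomial; infer_instance

def pvWitness_build_zhegalkin_polynomial : List Int × List String × List (List Int) :=
  ([1, 0], ["x"], [[0], [1]])

def Spec_build_zhegalkin_polynomial (vector : List Int) (VARS : List String) (var_values : List (List Int)) (out : String) : Prop := out = build_zhegalkin_polynomial_alt vector VARS var_values
instance (vector : List Int) (VARS : List String) (var_values : List (List Int)) (out : String) : Decidable (Spec_build_zhegalkin_polynomial vector VARS var_values out) := by unfold Spec_build_zhegalkin_polynomial; infer_instance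

-- ===== CLAIM (what is proved, stated in full; the proofs are below) =====
def Claim_equal_build_zhegalkin_polynomial : Prop := ∀ (vector : List Int) (VARS : List String) (var_values : List (List Int)), Dom_build_zhegalkin_polynomial vector VARS var_values → Pre_build_zhegalkin_polynomial vector VARS var_values → Spec_build_zhegalkin_polynomial vector VARS var_values (build_zhegalkin_polynomial vector VARS var_values)

-- ===== LEMMAS AND PROOFS =====

def zipXor (a b : List Int) : List Int := List.zipWith (fun x y => PySem.Int.bxor x y) a b

def mergePairs : List (List Int) → List (List Int)
  | a :: b :: rest => (a ++ zipXor a b) :: mergePairs rest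
  | _ => []

def Mb : Nat → List (List Int) → List Int
  | 0, bs => bs.flatten
  | k+1, bs => Mb k (mergePairs bs)

theorem mergePairs_length : ∀ bs : List (List Int), (mergePairs bs).length = bs.length / 2
  | [] => by simp [mergePairs]
  | [a] => by simp [mergePairs]
  | a :: b :: rest => by
      simp [mergePairs, mergePairs_length rest]; omega

theorem mergePairs_blocks : ∀ (bs : List (List Int)) (L : Nat),
    (∀ u ∈ bs, u.length = L) → ∀ u ∈ mergePairs bs, u.length = 2 * L
  | [], _, _ => by simp [mergePairs]
  | [a], _, _ => by simp [mergePairs]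
  | a :: b :: rest, L, h => by
      intro u hu
      simp [mergePairs] at hu
      rcases hu with rfl | hu
      · have ha := h a (by simp)
        have hb := h b (by simp)
        simp [zipXor, ha, hb]; omega
      · exact mergePairs_blocks rest L (fun v hv => h v (by simp [hv])) u hu

theorem mergePairs_append : ∀ (X Y : List (List Int)), X.length % 2 = 0 →
    mergePairs (X ++ Y) = mergePairs X ++ mergePairs Y
  | [], Y, _ => by simp [mergePairs]
  | [a], Y, h => by simp at h
  | a :: b :: X, Y, h => by
      have : X.length % 2 = 0 := by simp at h; omega
      simp only [List.cons_append, mergePairs, mergePairs_append X Y this]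

theorem modify_append_cons {α : Type} (l1 : List α) (x : α) (l2 : List α) (f : α → α) :
    (l1 ++ x :: l2).modify l1.length f = l1 ++ f x :: l2 := by
  induction l1 with
  | nil => simp
  | cons a l ih => simpa [List.modify] using ih

theorem modify_append_cons' {α : Type} (l1 : List α) (x : α) (l2 : List α) (f : α → α)
    (n : Nat) (h : n = l1.length) : (l1 ++ x :: l2).modify n f = l1 ++ f x :: l2 := by
  subst h; exact modify_append_cons l1 x l2 f

theorem getD_range_self (u : List Int) :
    (List.range u.length).map (fun j => u.getD j 0) = u := by
  apply List.ext_getElem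
  · simp
  · intro i h1 h2
    simp only [List.getElem_map, List.getElem_range, List.getD]
    rw [List.getElem?_eq_getElem (by simpa using h2)]
    rfl

theorem map_range_bxor (a b : List Int) (h : a.length = b.length) :
    (List.range b.length).map (fun j => PySem.Int.bxor (a.getD j 0) (b.getD j 0)) = zipXor a b := by
  apply List.ext_getElem
  · simp [zipXor, h]
  · intro i h1 h2
    simp [zipXor] at h2
    simp only [List.getElem_map, List.getElem_range, List.getElem_zipWith, zipXor, List.getD]
    rw [List.getElem?_eq_getElem (by omega : i < a.length),
        List.getElem?_eq_getElem (by omega : i < b.length)]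
    rfl

theorem round_partial (bs : List (List Int)) (L : Nat) (hL : ∀ u ∈ bs, u.length = L) :
    ∀ m q, 2 * m ≤ bs.length → m ≤ q →
    (List.range (2 * m)).foldl (pvRoundStep bs) (List.replicate q ([] : List Int)) =
      mergePairs (bs.take (2 * m)) ++ List.replicate (q - m) [] := by
  intro m
  induction m with
  | zero => intro q _ _; simp [mergePairs]
  | succ m ih =>
    intro q hm hq
    have h2m : 2 * m < bs.length := by omega
    have h2m1 : 2 * m + 1 < bs.length := by omega
    have hrange : List.range (2 * (m + 1)) = (List.range (2 * m) ++ [2 * m]) ++ [2 * m + 1] := by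
      have : 2 * (m + 1) = (2 * m + 1) + 1 := by omega
      rw [this, List.range_succ, List.range_succ]
    rw [hrange, List.foldl_append, List.foldl_append, ih q (by omega) (by omega)]
    have hlen : (mergePairs (bs.take (2 * m))).length = m := by
      rw [mergePairs_length]; simp; omega
    have hrep : List.replicate (q - m) ([] : List Int) = [] :: List.replicate (q - (m + 1)) [] := by
      have : q - m = (q - (m + 1)) + 1 := by omega
      rw [this, List.replicate_succ]
    -- even step i = 2*m
    have hget0 : bs.getD (2 * m) [] = bs[2 * m] := List.getD_eq_getElem bs [] h2m
    have hget1 : bs.getD (2 * m + 1) [] = bs[2 * m + 1] := List.getD_eq_getElem bs [] h2m1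
    have hLa : bs[2 * m].length = L := hL _ (by simp)
    have hLb : bs[2 * m + 1].length = L := hL _ (by simp)
    simp only [List.foldl_cons, List.foldl_nil]
    rw [hrep]
    have heven : pvRoundStep bs (mergePairs (bs.take (2 * m)) ++ [] :: List.replicate (q - (m + 1)) []) (2 * m) =
        mergePairs (bs.take (2 * m)) ++ bs[2 * m] :: List.replicate (q - (m + 1)) [] := by
      have hmod : (2 * m) % 2 = 0 := by omega
      have hidx : (2 * m) / 2 = m := by omega
      simp only [pvRoundStep, hmod, hidx, hget0,
        show ((0 : Nat) == 0) = true from rfl, if_true]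
      rw [modify_append_cons' _ _ _ _ m hlen.symm]
      simp only [PySem.List.foldl_append_singleton_eq_map, getD_range_self]
      simp
    rw [heven]
    have hodd : pvRoundStep bs (mergePairs (bs.take (2 * m)) ++ bs[2 * m] :: List.replicate (q - (m + 1)) []) (2 * m + 1) =
        mergePairs (bs.take (2 * m)) ++ (bs[2 * m] ++ zipXor bs[2 * m] bs[2 * m + 1]) :: List.replicate (q - (m + 1)) [] := by
      have hmod : (2 * m + 1) % 2 = 1 := by omega
      have hidx : (2 * m + 1) / 2 = m := by omega
      have hsub : 2 * m + 1 - 1 = 2 * m := by omega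
      simp only [pvRoundStep, hmod, hidx, hsub, hget0, hget1,
        show ((1 : Nat) == 0) = false from rfl, Bool.false_eq_true, if_false]
      rw [modify_append_cons' _ _ _ _ m hlen.symm]
      rw [PySem.List.foldl_append_singleton_eq_map]
      rw [map_range_bxor _ _ (by rw [hLa, hLb])]
    rw [hodd]
    -- identify with mergePairs of the longer prefix
    have htake : bs.take (2 * (m + 1)) = bs.take (2 * m) ++ [bs[2 * m], bs[2 * m + 1]] := by
      have h1 : 2 * (m + 1) = 2 * m + 2 := by omega
      have hd : List.drop (2 * m) bs = bs[2 * m] :: bs[2 * m + 1] :: List.drop (2 * m + 2) bs := by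
        rw [List.drop_eq_getElem_cons h2m, List.drop_eq_getElem_cons h2m1]
      rw [h1, List.take_add, hd]
      simp [List.take]
    rw [htake, mergePairs_append _ _ (by simp; omega)]
    simp [mergePairs]

theorem pascal_round_eq (bs : List (List Int)) (L : Nat) (hL : ∀ u ∈ bs, u.length = L)
    (heven : bs.length % 2 = 0) : pvPascalRound bs bs.length = mergePairs bs := by
  unfold pvPascalRound
  have h2 : 2 * (bs.length / 2) = bs.length := by omega
  have := round_partial bs L hL (bs.length / 2) (bs.length / 2) (by omega) (le_refl _)
  rw [h2] at this
  rw [this]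
  simp

theorem loopMb : ∀ (k : Nat) (bs : List (List Int)) (L : Nat), bs.length = 2 ^ k →
    (∀ u ∈ bs, u.length = L) → pvPascalLoop (2 ^ k) bs = Mb k bs := by
  intro k
  induction k with
  | zero =>
    intro bs L hlen _
    rw [pvPascalLoop]
    simp at hlen
    simp [hlen, Mb]
  | succ k ih =>
    intro bs L hlen hL
    rw [pvPascalLoop]
    have hge : 2 ^ (k + 1) ≥ 1 := Nat.one_le_two_pow
    have hne : (bs.length == 1) = false := by
      have h2 : bs.length ≠ 1 := by
        rw [hlen, Nat.pow_succ]
        have := Nat.one_le_two_pow (n := k); omega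
      exact beq_eq_false_iff_ne.mpr h2
    rw [if_pos hge]
    simp only [hne, Bool.false_eq_true, if_false]
    have hround : pvPascalRound bs (2 ^ (k + 1)) = mergePairs bs := by
      rw [← hlen]
      exact pascal_round_eq bs L hL (by rw [hlen, Nat.pow_succ]; omega)
    have hdiv : 2 ^ (k + 1) / 2 = 2 ^ k := by
      rw [Nat.pow_succ]; omega
    rw [hround, hdiv, ih (mergePairs bs) (2 * L)
      (by rw [mergePairs_length, hlen, Nat.pow_succ]; omega)
      (mergePairs_blocks bs L hL)]
    rfl

theorem split_lemma : ∀ (k : Nat) (A B : List (List Int)), A.length = 2 ^ k → B.length = 2 ^ k →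
    Mb (k + 1) (A ++ B) = Mb k A ++ zipXor (Mb k A) (Mb k B) := by
  intro k
  induction k with
  | zero =>
    intro A B hA hB
    simp at hA hB
    obtain ⟨a, rfl⟩ := List.length_eq_one_iff.mp hA
    obtain ⟨b, rfl⟩ := List.length_eq_one_iff.mp hB
    simp [Mb, mergePairs]
  | succ k ih =>
    intro A B hA hB
    have heven : A.length % 2 = 0 := by rw [hA, Nat.pow_succ]; omega
    show Mb (k + 1) (mergePairs (A ++ B)) = _
    rw [mergePairs_append A B heven]
    rw [ih (mergePairs A) (mergePairs B)
      (by rw [mergePairs_length, hA, Nat.pow_succ]; omega)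
      (by rw [mergePairs_length, hB, Nat.pow_succ]; omega)]
    rfl

theorem altMb : ∀ (k : Nat) (f : List Int), f.length = 2 ^ k →
    pvAltCoeffs f = Mb k (f.map (fun x => [x])) := by
  intro k
  induction k with
  | zero =>
    intro f hf
    simp at hf
    obtain ⟨a, rfl⟩ := List.length_eq_one_iff.mp hf
    rw [pvAltCoeffs]
    simp [Mb]
  | succ k ih =>
    intro f hf
    have hge2 : f.length ≥ 2 := by
      rw [hf, Nat.pow_succ]
      have := Nat.one_le_two_pow (n := k); omega
    rw [pvAltCoeffs, if_neg (by omega)]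
    show pvAltCoeffs (f.take (f.length / 2)) ++
        List.zipWith (fun x y => PySem.Int.bxor x y) (pvAltCoeffs (f.take (f.length / 2)))
          (pvAltCoeffs (f.drop (f.length / 2))) = Mb (k + 1) (f.map (fun x => [x]))
    have hm : f.length / 2 = 2 ^ k := by rw [hf, Nat.pow_succ]; omega
    have htl : (f.take (f.length / 2)).length = 2 ^ k := by simp [hm]; omega
    have hdl : (f.drop (f.length / 2)).length = 2 ^ k := by
      simp [hm]; rw [hf, Nat.pow_succ]; omega
    rw [ih _ htl, ih _ hdl]
    have := split_lemma k ((f.take (f.length / 2)).map (fun x => [x]))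
        ((f.drop (f.length / 2)).map (fun x => [x])) (by simpa using htl) (by simpa using hdl)
    rw [show zipXor = (fun a b => List.zipWith (fun x y => PySem.Int.bxor x y) a b) from rfl] at this
    rw [← this, ← List.map_append, List.take_append_drop]

theorem coeffs_eq (vector : List Int) (k : Nat) (hk : vector.length = 2 ^ k) :
    pvFindCoeffs vector = pvAltCoeffs vector := by
  unfold pvFindCoeffs
  rw [hk]
  rw [loopMb k (vector.map (fun x => [x])) 1 (by simpa using hk)
    (by intro u hu; simp at hu; obtain ⟨x, _, rfl⟩ := hu; rfl)]
  rw [altMb k vector hk]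

theorem inner_eq (VARS : List String) (values : List Int) :
    (List.range values.length).foldl
        (fun s j => if values.getD j 0 == 1 then s ++ [VARS.getD j ""] else s) ([] : List String)
      = values.zipIdx.filterMap (fun jv => if jv.1 == 1 then some (VARS.getD jv.2 "") else none) := by
  induction values using List.reverseRecOn with
  | nil => simp
  | append_singleton vs v ih =>
    rw [List.length_append, List.length_singleton, List.range_succ, List.foldl_append]
    have hcongr : (List.range vs.length).foldl
        (fun s j => if (vs ++ [v]).getD j 0 == 1 then s ++ [VARS.getD j ""] else s) ([] : List String)
      = (List.range vs.length).foldl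
        (fun s j => if vs.getD j 0 == 1 then s ++ [VARS.getD j ""] else s) ([] : List String) := by
      apply PySem.List.foldl_congr_mem
      intro acc x hx
      have hx' : x < vs.length := by simpa using hx
      rw [List.getD_append vs [v] 0 x hx']
    rw [hcongr, ih, List.zipIdx_append, List.filterMap_append]
    have hv : (vs ++ [v]).getD vs.length 0 = v := by
      have hlt : vs.length < (vs ++ [v]).length := by simp
      rw [List.getD_eq_getElem (vs ++ [v]) 0 hlt]
      simp
    simp only [List.foldl_cons, List.foldl_nil, hv]
    by_cases h : v = 1 <;> simp [h, List.zipIdx, List.filterMap]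

theorem filter_foldl_push {α : Type} (c : α → Bool) (t : α → String) :
    ∀ (l : List α) (r0 : List String),
    (l.foldl (fun r x => if c x then r ++ [t x] else r) r0).filter (fun s => s != "")
      = l.foldl (fun r x => if c x then (if t x != "" then r ++ [t x] else r) else r)
          (r0.filter (fun s => s != "")) := by
  intro l
  induction l with
  | nil => intro r0; simp
  | cons x xs ih =>
    intro r0
    simp only [List.foldl_cons]
    by_cases hc : c x
    · simp only [hc, if_true]
      rw [ih]
      congr 1
      rw [List.filter_append]
      by_cases ht : t x = ""
      · simp [ht]
      · have hb : (t x != "") = true := by simpa using ht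
        simp [List.filter, hb]
    · simp only [hc, Bool.false_eq_true, if_false]
      exact ih r0

-- ===== VERDICT (by name: the statement is the Claim_ definition above) =====
theorem build_zhegalkin_polynomial_spec : Claim_equal_build_zhegalkin_polynomial := by
  intro vector VARS var_values _ hPre
  obtain ⟨⟨k, _, hk⟩, _, _⟩ := hPre
  unfold Spec_build_zhegalkin_polynomial
  unfold build_zhegalkin_polynomial build_zhegalkin_polynomial_alt
  rw [coeffs_eq vector k hk]
  set coef := pvAltCoeffs vector with hcoef
  -- initial list: the two guards agree, and "1" survives the filter
  have hinit :
      (if coef.getD 0 0 == 1 then [PySem.Int.toStr (coef.getD 0 0)] else []).filter (fun s => s != "")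
        = (if !coef.isEmpty && coef.getD 0 0 == 1 then ["1"] else []) := by
    rcases coef with _ | ⟨c0, rest⟩
    · simp
    · by_cases h : c0 = 1
      · subst h; simp [List.filter]; decide
      · simp [List.getD, h]
  -- rewrite A's inner loop to B's term expression
  have hbody : var_values.zipIdx.foldl (fun res p =>
        if coef.getD p.2 0 != 0 then
          res ++ [PySem.Str.join "*" ((List.range p.1.length).foldl
            (fun s j => if p.1.getD j 0 == 1 then s ++ [VARS.getD j ""] else s) ([] : List String))]
        else res)
        (if coef.getD 0 0 == 1 then [PySem.Int.toStr (coef.getD 0 0)] else [])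
      = var_values.zipIdx.foldl (fun res p =>
        if coef.getD p.2 0 != 0 then
          res ++ [PySem.Str.join "*" (p.1.zipIdx.filterMap
            (fun jv => if jv.1 == 1 then some (VARS.getD jv.2 "") else none))]
        else res)
        (if coef.getD 0 0 == 1 then [PySem.Int.toStr (coef.getD 0 0)] else []) := by
    apply PySem.List.foldl_congr_mem
    intro acc p _
    rw [inner_eq VARS p.1]
  simp only [hbody]
  have hpush := filter_foldl_push (fun p : List Int × Nat => coef.getD p.2 0 != 0)
    (fun p : List Int × Nat => PySem.Str.join "*" (p.1.zipIdx.filterMap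
      (fun jv => if jv.1 == 1 then some (VARS.getD jv.2 "") else none)))
    var_values.zipIdx
    (if coef.getD 0 0 == 1 then [PySem.Int.toStr (coef.getD 0 0)] else [])
  simp only [] at hpush
  rw [hpush, hinit]
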